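-- pv_equiv track=rewrite | github.com/ekirton/wily-rooster | src/poule/extraction/checkpoint.py | classify_files
-- ===== SOURCE A (Python) =====
-- from typing import Optional
--
-- def classify_file(
--     file_path: str,
--     current_hash: Optional[str],
--     checkpoint_files: dict[str, str],
-- ) -> str:
--     """Classify a single file relative to checkpoint state.
--
--     Returns one of ``"unchanged"``, ``"changed"``, ``"new"``, ``"removed"``.
--     """
--     if current_hash is None:
--         if file_path in checkpoint_files:
--             return "removed"
--         return "new"
--
--     if file_path not in checkpoint_files:
--         return "new"
--
--     if checkpoint_files[file_path] == current_hash: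
--         return "unchanged"
--
--     return "changed"
--
-- def classify_files(
--     current_files: dict[str, str],
--     checkpoint_files: dict[str, str],
-- ) -> dict[str, str]:
--     """Classify every file in *current_files* and *checkpoint_files*.
--
--     Returns a dict mapping file path to one of
--     ``"unchanged"``, ``"changed"``, ``"new"``, ``"removed"``.
--     """
--     result: dict[str, str] = {}
--
--     for path, h in current_files.items():
--         result[path] = classify_file(path, h, checkpoint_files)
--
--     # Files in checkpoint but not in current set are removed.
--     for path in checkpoint_files:
--         if path not in current_files:
--             result[path] = classify_file(path, None, checkpoint_files)
--
--     return result
-- ===== SOURCE B (Python) =====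
-- def classify_files(current_files, checkpoint_files):
--     """Staged overwrite passes: provisional labels refined in place."""
--     # Stage 1: every currently-present file is provisionally "new".
--     result = dict.fromkeys(current_files, "new")
--     # Stage 2: every checkpointed path overrides: present -> "changed", absent -> "removed".
--     for path in checkpoint_files:
--         if path in result:
--             result[path] = "changed"
--         else:
--             result[path] = "removed"
--     # Stage 3: a (path, hash) pair that survived intact is "unchanged".
--     for path, h in checkpoint_files.items():
--         if current_files.get(path) == h:
--             result[path] = "unchanged"
--     return result
-- ===== Notes on version B (the rewrite author's own statement) =====
-- stated objective: alternative
-- what changed: Replaces A's per-path four-branch classifier run over two key passes with three staged overwrite passes that refine provisional labels in place: mark all current files "new", then overwrite every checkpointed path to "changed"/"removed" by presence, then overwrite surviving (path, hash) pairs to "unchanged".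
import Mathlib
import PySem

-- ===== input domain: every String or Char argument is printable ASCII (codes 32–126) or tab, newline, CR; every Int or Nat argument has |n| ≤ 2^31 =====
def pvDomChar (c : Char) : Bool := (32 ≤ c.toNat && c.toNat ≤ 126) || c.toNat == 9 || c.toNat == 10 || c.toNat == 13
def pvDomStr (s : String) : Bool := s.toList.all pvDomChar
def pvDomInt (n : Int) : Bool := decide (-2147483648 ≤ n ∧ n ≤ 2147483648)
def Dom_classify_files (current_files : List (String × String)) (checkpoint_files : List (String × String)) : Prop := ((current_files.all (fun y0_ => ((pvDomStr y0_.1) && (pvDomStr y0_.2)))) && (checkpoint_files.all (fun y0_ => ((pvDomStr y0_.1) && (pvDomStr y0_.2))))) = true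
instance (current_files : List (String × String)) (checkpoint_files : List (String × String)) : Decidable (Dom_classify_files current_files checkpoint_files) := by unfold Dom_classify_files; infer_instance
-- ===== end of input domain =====

-- B replaces the per-path classifier with three staged overwrite passes that refine
-- provisional labels in place (new -> changed/removed -> unchanged); return value only.

-- ===== PORT A =====
def pvClassifyFile (file_path : String) (current_hash : Option String)
    (checkpoint_files : PySem.Dict String String) : String :=
  match current_hash with
  | none =>
    if checkpoint_files.contains file_path then "removed" else "new"
  | some h =>
    match checkpoint_files.get? file_path with
    | none => "new"                                   -- "if file_path not in checkpoint_files: return \"new\""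
    | some c => if c == h then "unchanged" else "changed"

def classify_files (current_files : List (String × String)) (checkpoint_files : List (String × String)) : List (String × String) :=
  let curD := PySem.Dict.mk current_files
  let chkD := PySem.Dict.mk checkpoint_files
  let r1 := current_files.foldl
    (fun res p => res.insert p.1 (pvClassifyFile p.1 (some p.2) chkD)) PySem.Dict.empty
  let r2 := checkpoint_files.foldl
    (fun res p => if curD.contains p.1 then res
                  else res.insert p.1 (pvClassifyFile p.1 none chkD)) r1
  r2.items

-- ===== PORT B =====
def classify_files_alt (current_files : List (String × String)) (checkpoint_files : List (String × String)) : List (String × String) :=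
  let curD := PySem.Dict.mk current_files
  -- Stage 1: every currently-present file is provisionally "new" (dict.fromkeys).
  let r1 := current_files.foldl (fun r p => r.insert p.1 "new") PySem.Dict.empty
  -- Stage 2: every checkpointed path overrides: present -> "changed", absent -> "removed".
  let r2 := checkpoint_files.foldl
    (fun r p => if r.contains p.1 then r.insert p.1 "changed" else r.insert p.1 "removed") r1
  -- Stage 3: a (path, hash) pair that survived intact is "unchanged".
  let r3 := checkpoint_files.foldl
    (fun r p => if curD.get? p.1 == some p.2 then r.insert p.1 "unchanged" else r) r2
  r3.items

-- ===== PRECONDITION & SPEC =====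
-- Pre_ admits exactly the association lists that encode Python dicts (the functions'
-- declared argument type): lists with duplicate keys represent no dict input of A.
def Pre_classify_files (current_files : List (String × String)) (checkpoint_files : List (String × String)) : Prop :=
  (current_files.map Prod.fst).Nodup ∧ (checkpoint_files.map Prod.fst).Nodup
instance (current_files : List (String × String)) (checkpoint_files : List (String × String)) : Decidable (Pre_classify_files current_files checkpoint_files) := by unfold Pre_classify_files; infer_instance
def pvWitness_classify_files : (List (String × String)) × (List (String × String)) :=
  ([("a", "h1"), ("b", "h2")], [("a", "h1"), ("c", "h3")])
def Spec_classify_files (current_files : List (String × String)) (checkpoint_files : List (String × String)) (out : List (String × String)) : Prop := out = classify_files_alt current_files checkpoint_files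
instance (current_files : List (String × String)) (checkpoint_files : List (String × String)) (out : List (String × String)) : Decidable (Spec_classify_files current_files checkpoint_files out) := by unfold Spec_classify_files; infer_instance

-- ===== CLAIM (what is proved, stated in full; the proofs are below) =====
def Claim_equal_classify_files : Prop := ∀ (current_files : List (String × String)) (checkpoint_files : List (String × String)), Dom_classify_files current_files checkpoint_files → Pre_classify_files current_files checkpoint_files → Spec_classify_files current_files checkpoint_files (classify_files current_files checkpoint_files)

-- ===== LEMMAS AND PROOFS =====

-- A conditional skip loop is the loop over the filtered list.
theorem pv_foldl_if_skip {α β : Type} (l : List α) (d : β) (P : α → Bool) (g : β → α → β) :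
    l.foldl (fun r q => if P q then g r q else r) d = (l.filter P).foldl g d := by
  induction l generalizing d with
  | nil => rfl
  | cons a t ih => by_cases h : P a <;> simp [h, ih]

-- A's second loop (conditional insert) is the insert loop over the filtered list.
theorem pv_foldl_if_filter (l : List (String × String)) (d : PySem.Dict String String)
    (P : String → Bool) (g : String → String) :
    l.foldl (fun res p => if P p.1 then res else res.insert p.1 (g p.1)) d
      = (l.filter (fun p => !P p.1)).foldl (fun res p => res.insert p.1 (g p.1)) d := by
  induction l generalizing d with
  | nil => rfl
  | cons a t ih => by_cases h : P a.1 <;> simp [h, ih]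

-- Updating a key set by a duplicate-free list appends exactly the new keys.
theorem pv_set_update_filter (l : List String) (hl : l.Nodup) :
    ∀ xs : List String, PySem.Set.update xs l = xs ++ l.filter (fun x => decide (x ∉ xs)) := by
  induction l with
  | nil => intro xs; simp [PySem.Set.update]
  | cons a t ih =>
    intro xs
    rcases List.nodup_cons.mp hl with ⟨ha, ht⟩
    have hstep : PySem.Set.update xs (a :: t) = PySem.Set.update (PySem.Set.add xs a) t := rfl
    rw [hstep, ih ht]
    by_cases hmem : a ∈ xs
    · simp [PySem.Set.add, hmem]
    · have hadd : PySem.Set.add xs a = xs ++ [a] := by simp [PySem.Set.add, hmem]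
      rw [hadd]
      have hfc : t.filter (fun x => decide (x ∉ xs ++ [a])) = t.filter (fun x => decide (x ∉ xs)) := by
        refine List.filter_congr ?_
        intro x hx
        have hxa : x ≠ a := fun h => ha (h ▸ hx)
        simp [hxa]
      rw [hfc]
      simp [hmem]

-- keys of Dict.mk
theorem pv_keys_mk (l : List (String × String)) :
    (PySem.Dict.mk l).keys = l.map Prod.fst := by
  simp [PySem.Dict.keys]

-- canonical form of A's result
theorem pv_A_items (c k : List (String × String))
    (hc : (c.map Prod.fst).Nodup) (hk : (k.map Prod.fst).Nodup) :
    classify_files c k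
      = c.map (fun p => (p.1, pvClassifyFile p.1 (some p.2) (PySem.Dict.mk k)))
        ++ (k.filter (fun p => decide (p.1 ∉ c.map Prod.fst))).map
            (fun p => (p.1, pvClassifyFile p.1 none (PySem.Dict.mk k))) := by
  unfold classify_files
  simp only
  rw [pv_foldl_if_filter k _ (fun x => (PySem.Dict.mk c).contains x)
      (fun x => pvClassifyFile x none (PySem.Dict.mk k))]
  have hcontains : ∀ x : String, (PySem.Dict.mk c).contains x = decide (x ∈ c.map Prod.fst) := by
    intro x; rw [PySem.Dict.contains_eq_decide_mem_keys, pv_keys_mk]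
  have hfilt : k.filter (fun p => !(PySem.Dict.mk c).contains p.1)
      = k.filter (fun p => decide (p.1 ∉ c.map Prod.fst)) := by
    refine List.filter_congr ?_
    intro p _; rw [hcontains]; simp
  rw [hfilt]
  have h1 : (c.foldl (fun res p => res.insert p.1 (pvClassifyFile p.1 (some p.2) (PySem.Dict.mk k)))
      PySem.Dict.empty).items
      = c.map (fun p => (p.1, pvClassifyFile p.1 (some p.2) (PySem.Dict.mk k))) := by
    have := PySem.Dict.items_foldl_insert_fresh c Prod.fst
      (fun p => pvClassifyFile p.1 (some p.2) (PySem.Dict.mk k)) PySem.Dict.empty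
      (by intro a _; simp) hc
    simpa using this
  have hkeys1 : (c.foldl (fun res p => res.insert p.1 (pvClassifyFile p.1 (some p.2) (PySem.Dict.mk k)))
      PySem.Dict.empty).keys = c.map Prod.fst := by
    have := PySem.Dict.keys_foldl_insert_key c Prod.fst
      (fun _ p => pvClassifyFile p.1 (some p.2) (PySem.Dict.mk k)) PySem.Dict.empty
    rw [this, PySem.Dict.keys_empty, pv_set_update_filter _ hc]
    simp
  have hmf := List.filter_map (f := Prod.fst) (p := fun x => decide (x ∉ c.map Prod.fst)) (l := k)
  simp only [Function.comp_def] at hmf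
  have hnodupf : ((k.filter (fun p => decide (p.1 ∉ c.map Prod.fst))).map Prod.fst).Nodup := by
    rw [← hmf]
    exact hk.filter _
  have h2 := PySem.Dict.items_foldl_insert_fresh
      (k.filter (fun p => decide (p.1 ∉ c.map Prod.fst))) Prod.fst
      (fun p => pvClassifyFile p.1 none (PySem.Dict.mk k))
      (c.foldl (fun res p => res.insert p.1 (pvClassifyFile p.1 (some p.2) (PySem.Dict.mk k)))
        PySem.Dict.empty)
      (by
        intro a hfa
        rcases List.mem_filter.mp hfa with ⟨_, hdec⟩
        rw [PySem.Dict.contains_eq_decide_mem_keys, hkeys1]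
        simpa using of_decide_eq_true hdec)
      hnodupf
  rw [h2, h1]

-- no entry with key x in l → find? fails
theorem pv_find_none (l : List (String × String)) (x : String)
    (hx : x ∉ l.map Prod.fst) : l.find? (fun q => q.1 == x) = none := by
  induction l with
  | nil => rfl
  | cons a t ih =>
    simp only [List.map_cons, List.mem_cons, not_or] at hx
    have hne : ¬ ((a.1 == x) = true) := by
      simp only [beq_iff_eq]; intro he; exact hx.1 he.symm
    rw [List.find?_cons_of_neg (p := fun q : String × String => q.1 == x) hne, ih hx.2]

-- a member of a nodup-key list is what find? returns at its key
theorem pv_find_mem (l : List (String × String)) (p : String × String)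
    (hl : (l.map Prod.fst).Nodup) (hp : p ∈ l) :
    l.find? (fun q => q.1 == p.1) = some p := by
  induction l with
  | nil => cases hp
  | cons a t ih =>
    simp only [List.map_cons, List.nodup_cons] at hl
    rcases List.mem_cons.mp hp with h | h
    · subst h; exact List.find?_cons_of_pos (by simp)
    · have hmem : p.1 ∈ t.map Prod.fst := List.mem_map_of_mem h
      have hne : ¬ ((a.1 == p.1) = true) := by
        simp only [beq_iff_eq]; intro he; exact hl.1 (he ▸ hmem)
      rw [List.find?_cons_of_neg (p := fun q : String × String => q.1 == p.1) hne, ih hl.2 h]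

-- Dict.mk lookup is the first matching entry
theorem pv_get?_mk_find (l : List (String × String)) (x : String) :
    (PySem.Dict.mk l).get? x = (l.find? (fun q => q.1 == x)).map Prod.snd := by
  induction l with
  | nil => simp [PySem.Dict.get?]
  | cons a t ih =>
    rw [show ((a :: t) : List (String × String)) = (a.1, a.2) :: t by simp]
    rw [PySem.Dict.get?_mk_cons]
    by_cases h : (a.1 == x) = true
    · rw [List.find?_cons_of_pos (p := fun q : String × String => q.1 == x) h]; simp [h]
    · rw [List.find?_cons_of_neg (p := fun q : String × String => q.1 == x) h]; simp only [h]; exact ih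

-- find? over a filtered nodup-key list
theorem pv_find_filter (l : List (String × String)) (x : String)
    (hl : (l.map Prod.fst).Nodup) (cnd : String × String → Bool) :
    (l.filter cnd).find? (fun q => q.1 == x)
      = match l.find? (fun q => q.1 == x) with
        | some q => if cnd q then some q else none
        | none => none := by
  induction l with
  | nil => rfl
  | cons a t ih =>
    simp only [List.map_cons, List.nodup_cons] at hl
    by_cases hx : (a.1 == x) = true
    · rw [List.find?_cons_of_pos (p := fun q : String × String => q.1 == x) hx]
      have hxa : x = a.1 := (beq_iff_eq.mp hx).symm
      by_cases hc : cnd a = true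
      · rw [List.filter_cons_of_pos hc, List.find?_cons_of_pos (p := fun q : String × String => q.1 == x) hx]
        simp [hc]
      · rw [List.filter_cons_of_neg (by simp [hc])]
        have hnone : (t.filter cnd).find? (fun q => q.1 == x) = none := by
          apply pv_find_none
          intro hmem
          rcases List.mem_map.mp hmem with ⟨q, hq, hqe⟩
          exact hl.1 (hxa ▸ hqe ▸ List.mem_map_of_mem (List.mem_of_mem_filter hq))
        rw [hnone]; simp [hc]
    · rw [List.find?_cons_of_neg (p := fun q : String × String => q.1 == x) hx]
      by_cases hc : cnd a = true
      · rw [List.filter_cons_of_pos hc, List.find?_cons_of_neg (p := fun q : String × String => q.1 == x) hx, ih hl.2]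
      · rw [List.filter_cons_of_neg (by simp [hc]), ih hl.2]

-- a fold of inserts at keys avoiding x preserves the lookup at x
theorem pv_getD_fold_notmem (l : List (String × String)) (d : PySem.Dict String String)
    (x : String) (V : String × String → String) (hx : x ∉ l.map Prod.fst) :
    (l.foldl (fun r q => r.insert q.1 (V q)) d).getD x "" = d.getD x "" := by
  induction l generalizing d with
  | nil => rfl
  | cons a t ih =>
    simp only [List.map_cons, List.mem_cons, not_or] at hx
    rw [List.foldl_cons, ih _ hx.2, PySem.Dict.getD_insert_of_ne _ (V a) "" hx.1]

-- lookup after a fold of inserts over a nodup-key list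
theorem pv_getD_fold (l : List (String × String)) (d : PySem.Dict String String)
    (x : String) (V : String × String → String) (hl : (l.map Prod.fst).Nodup) :
    (l.foldl (fun r q => r.insert q.1 (V q)) d).getD x ""
      = match l.find? (fun q => q.1 == x) with
        | some q => V q
        | none => d.getD x "" := by
  induction l generalizing d with
  | nil => rfl
  | cons a t ih =>
    simp only [List.map_cons, List.nodup_cons] at hl
    by_cases hx : (a.1 == x) = true
    · have hxa : x = a.1 := (beq_iff_eq.mp hx).symm
      rw [List.find?_cons_of_pos (p := fun q : String × String => q.1 == x) hx, List.foldl_cons,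
        pv_getD_fold_notmem t _ x V (by rw [hxa]; exact hl.1)]
      rw [hxa, PySem.Dict.getD_insert_self]
    · have hne : x ≠ a.1 := fun h => hx (by simp [h])
      rw [List.find?_cons_of_neg (p := fun q : String × String => q.1 == x) hx, List.foldl_cons, ih _ hl.2,
        show ((d.insert a.1 (V a)).getD x "") = d.getD x "" from
          PySem.Dict.getD_insert_of_ne _ (V a) "" hne]

-- B's stage-2 membership test reads the stage-1 dict: each checkpoint key is seen once
theorem pv_stage2_eq (k : List (String × String)) (d : PySem.Dict String String)
    (hk : (k.map Prod.fst).Nodup) :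
    k.foldl (fun r q => if r.contains q.1 then r.insert q.1 "changed" else r.insert q.1 "removed") d
      = k.foldl (fun r q => r.insert q.1 (if d.contains q.1 then "changed" else "removed")) d := by
  induction k generalizing d with
  | nil => rfl
  | cons a t ih =>
    simp only [List.map_cons, List.nodup_cons] at hk
    have h1 : (if d.contains a.1 then d.insert a.1 "changed" else d.insert a.1 "removed")
        = d.insert a.1 (if d.contains a.1 then "changed" else "removed") := by
      by_cases h : d.contains a.1 <;> simp [h]
    rw [List.foldl_cons, List.foldl_cons]
    show List.foldl _ (if d.contains a.1 then d.insert a.1 "changed" else d.insert a.1 "removed") t = _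
    rw [h1, ih _ hk.2]
    refine PySem.List.foldl_congr_mem' t _ _ _ ?_
    intro q hq r
    have hne : (q.1 == a.1) = false := by
      simp only [beq_eq_false_iff_ne, ne_eq]
      intro he; exact hk.1 (he ▸ List.mem_map_of_mem hq)
    rw [PySem.Dict.contains_insert]
    simp [hne]

-- ===== VERDICT (by name: the statement is the Claim_ definition above) =====
theorem classify_files_spec : Claim_equal_classify_files := by
  intro c k _ hpre
  obtain ⟨hc, hk⟩ := hpre
  unfold Spec_classify_files
  rw [pv_A_items c k hc hk]
  unfold classify_files_alt
  simp only
  rw [pv_stage2_eq k _ hk, pv_foldl_if_skip]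
  set P : String × String → Bool := fun q => ((PySem.Dict.mk c).get? q.1 == some q.2) with hP
  set r1 := c.foldl (fun r p => r.insert p.1 "new") PySem.Dict.empty with hr1
  set r2 := k.foldl (fun r q => r.insert q.1 (if r1.contains q.1 then "changed" else "removed")) r1 with hr2
  set r3 := (k.filter P).foldl (fun r q => r.insert q.1 "unchanged") r2 with hr3
  -- keys of the staged dicts
  have hkeys1 : r1.keys = c.map Prod.fst := by
    rw [hr1, PySem.Dict.keys_foldl_insert_key c Prod.fst (fun _ _ => "new") PySem.Dict.empty,
      PySem.Dict.keys_empty, pv_set_update_filter _ hc]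
    simp
  have hkeys2 : r2.keys = c.map Prod.fst ++ (k.map Prod.fst).filter (fun x => decide (x ∉ c.map Prod.fst)) := by
    rw [hr2, PySem.Dict.keys_foldl_insert_key k Prod.fst
      (fun _ q => if r1.contains q.1 then "changed" else "removed") r1,
      hkeys1, pv_set_update_filter _ hk]
  have hnod2 : r2.keys.Nodup := by
    rw [hkeys2]
    refine List.Nodup.append hc (hk.filter _) ?_
    intro x hx hy
    rcases List.mem_filter.mp hy with ⟨_, hdec⟩
    exact (of_decide_eq_true hdec) hx
  have hnodfl : ((k.filter P).map Prod.fst).Nodup := by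
    exact hk.sublist (List.Sublist.map Prod.fst (List.filter_sublist (l := k)))
  have hkeys3 : r3.keys = r2.keys := by
    rw [hr3, PySem.Dict.keys_foldl_insert_key (k.filter P) Prod.fst (fun _ _ => "unchanged") r2,
      pv_set_update_filter _ hnodfl]
    have : ((k.filter P).map Prod.fst).filter (fun x => decide (x ∉ r2.keys)) = [] := by
      rw [List.filter_eq_nil_iff]
      intro x hx
      rcases List.mem_map.mp hx with ⟨q, hq, hqe⟩
      have hqk : q ∈ k := List.mem_of_mem_filter hq
      have hmemk : x ∈ k.map Prod.fst := hqe ▸ List.mem_map_of_mem hqk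
      have : x ∈ r2.keys := by
        rw [hkeys2]
        by_cases hxc : x ∈ c.map Prod.fst
        · exact List.mem_append_left _ hxc
        · exact List.mem_append_right _ (List.mem_filter.mpr ⟨hmemk, by simpa using hxc⟩)
      simp [this]
    rw [this]
    simp
  have hnod3 : r3.keys.Nodup := hkeys3 ▸ hnod2
  -- lookups in the staged dicts
  have hC1 : ∀ y, r1.contains y = decide (y ∈ c.map Prod.fst) := by
    intro y; rw [PySem.Dict.contains_eq_decide_mem_keys, hkeys1]
  have hG1 : ∀ x, r1.getD x "" = match c.find? (fun q => q.1 == x) with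
      | some _ => "new" | none => "" := by
    intro x
    rw [hr1, pv_getD_fold c PySem.Dict.empty x (fun _ => "new") hc]
    cases c.find? (fun q => q.1 == x) <;> simp [PySem.Dict.getD_empty]
  have hG2 : ∀ x, r2.getD x "" = match k.find? (fun q => q.1 == x) with
      | some q => (if r1.contains q.1 then "changed" else "removed") | none => r1.getD x "" := by
    intro x
    rw [hr2, pv_getD_fold k r1 x (fun q => if r1.contains q.1 then "changed" else "removed") hk]
  have hG3 : ∀ x, r3.getD x "" = match (k.filter P).find? (fun q => q.1 == x) with
      | some _ => "unchanged" | none => r2.getD x "" := by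
    intro x
    rw [hr3, pv_getD_fold (k.filter P) r2 x (fun _ => "unchanged") hnodfl]
  -- assemble B's items and compare pointwise
  rw [PySem.Dict.items_eq_map_keys r3 hnod3 "", hkeys3, hkeys2, List.map_append]
  congr 1
  · rw [List.map_map]
    refine List.map_congr_left ?_
    intro p hp
    simp only [Function.comp_apply]
    have hfc : c.find? (fun q => q.1 == p.1) = some p := pv_find_mem c p hc hp
    have hcur : (PySem.Dict.mk c).get? p.1 = some p.2 := by
      rw [pv_get?_mk_find, hfc]; rfl
    refine Prod.ext rfl ?_
    show pvClassifyFile p.1 (some p.2) (PySem.Dict.mk k) = r3.getD p.1 ""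
    rw [hG3, pv_find_filter k p.1 hk P]
    cases hfk : k.find? (fun q => q.1 == p.1) with
    | none =>
      have hchk : (PySem.Dict.mk k).get? p.1 = none := by rw [pv_get?_mk_find, hfk]; rfl
      simp only [pvClassifyFile, hchk]
      rw [hG2, hfk, hG1, hfc]
    | some q =>
      have hq1 : q.1 = p.1 := by
        have := List.find?_some hfk
        exact beq_iff_eq.mp this
      have hchk : (PySem.Dict.mk k).get? p.1 = some q.2 := by rw [pv_get?_mk_find, hfk]; rfl
      have hPq : P q = (p.2 == q.2) := by
        rw [hP]
        simp only [hq1, hcur]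
        simp
      simp only [pvClassifyFile, hchk]
      by_cases hb : q.2 = p.2
      · have : P q = true := by rw [hPq]; simp [hb]
        simp [this, hb]
      · have hPf : P q = false := by
          rw [hPq]
          simp only [beq_eq_false_iff_ne, ne_eq]
          exact fun he => hb he.symm
        have hbq : (q.2 == p.2) = false := by
          simp only [beq_eq_false_iff_ne, ne_eq]; exact hb
        simp only [hPf, hbq]
        rw [hG2, hfk]
        simp only [hq1, hC1 p.1]
        have : p.1 ∈ c.map Prod.fst := List.mem_map_of_mem hp
        simp [this]
  · have hmf := List.filter_map (f := Prod.fst) (p := fun x => decide (x ∉ c.map Prod.fst)) (l := k)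
    simp only [Function.comp_def] at hmf
    rw [hmf, List.map_map]
    refine List.map_congr_left ?_
    intro q hq
    simp only [Function.comp_apply]
    rcases List.mem_filter.mp hq with ⟨hqk, hdec⟩
    have hnotc : q.1 ∉ c.map Prod.fst := of_decide_eq_true hdec
    have hfc : c.find? (fun q' => q'.1 == q.1) = none := pv_find_none c q.1 hnotc
    have hcur : (PySem.Dict.mk c).get? q.1 = none := by rw [pv_get?_mk_find, hfc]; rfl
    have hfk : k.find? (fun q' => q'.1 == q.1) = some q := pv_find_mem k q hk hqk
    refine Prod.ext rfl ?_
    show pvClassifyFile q.1 none (PySem.Dict.mk k) = r3.getD q.1 ""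
    have hcontk : (PySem.Dict.mk k).contains q.1 = true := by
      rw [PySem.Dict.contains_eq_decide_mem_keys, pv_keys_mk]
      simp only [decide_eq_true_eq]
      exact List.mem_map_of_mem hqk
    simp only [pvClassifyFile, hcontk, if_true]
    rw [hG3, pv_find_filter k q.1 hk P, hfk]
    have hPf : P q = false := by rw [hP]; simp [hcur]
    simp only [hPf]
    rw [hG2, hfk]
    have : r1.contains q.1 = false := by rw [hC1]; simpa using hnotc
    simp [this]
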